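-- pv_equiv track=rewrite | github.com/joelmccoy/adventofcode | day13/day13.py | get_reflected_row_number
-- ===== SOURCE A (Python) =====
-- def get_reflected_row_number(pattern: list[str]) -> int:
--     for idx in range(len(pattern) - 1):
--         if pattern[idx] == pattern[idx + 1]:
--             delta = 0
--             while True:
--                 if idx - delta < 0 or idx + delta + 1 >= len(pattern):
--                     return idx
--                 if pattern[idx - delta] != pattern[idx + delta + 1]:
--                     break
--                 delta += 1
--
--     return -1
-- ===== SOURCE B (Python) =====
-- def get_reflected_row_number(pattern: list[str]) -> int:
--     # A reflection axis that reaches a boundary is exactly an even-length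
--     # palindromic prefix or suffix of the row list; enumerate those and
--     # return the smallest corresponding axis index.  The boundary-row
--     # comparison short-circuits the slice test in the common case.
--     n = len(pattern)
--     cands = []
--     for half in range(1, n // 2 + 1):
--         if pattern[0] == pattern[2 * half - 1]:
--             pre = pattern[:2 * half]
--             if pre == pre[::-1]:
--                 cands.append(half - 1)
--         if pattern[n - 2 * half] == pattern[n - 1]:
--             suf = pattern[n - 2 * half:]
--             if suf == suf[::-1]:
--                 cands.append(n - 1 - half)
--     return min(cands) if cands else -1
-- ===== Notes on version B (the rewrite author's own statement) =====
-- stated objective: alternative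
-- what changed: Instead of scanning candidate axes and expanding mirrored row pairs outward, B enumerates the even-length palindromic prefixes and suffixes of the row list (a boundary-row comparison short-circuiting a whole-slice reversal-equality test), collects the axis index each one induces, and returns the minimum of the candidates.
import Mathlib
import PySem

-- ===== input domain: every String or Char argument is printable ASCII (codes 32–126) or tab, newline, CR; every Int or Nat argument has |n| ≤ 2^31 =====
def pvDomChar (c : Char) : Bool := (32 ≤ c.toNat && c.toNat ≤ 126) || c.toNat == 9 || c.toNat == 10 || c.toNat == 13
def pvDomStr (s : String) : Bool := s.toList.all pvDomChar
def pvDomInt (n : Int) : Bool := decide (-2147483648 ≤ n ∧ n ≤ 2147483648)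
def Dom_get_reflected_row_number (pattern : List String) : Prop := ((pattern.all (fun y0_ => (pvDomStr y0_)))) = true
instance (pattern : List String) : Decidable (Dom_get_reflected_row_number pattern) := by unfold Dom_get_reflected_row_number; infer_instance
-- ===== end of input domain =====

-- B replaces A's axis scan with outward pair expansion by a different algorithm:
-- it enumerates even-length palindromic prefixes/suffixes of the row list (whole-slice
-- reversal equality), collects the axis each induces, and returns the minimum
-- (objective: alternative; same return value).

-- ===== PORT A =====
-- inner 'while True' loop of A: returns true when the reflection reaches a boundary
-- (Python 'return idx'), false on a mismatch (Python 'break')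
def pvExpandA (p : List String) (idx delta : Nat) : Bool :=
  if (idx : Int) - delta < 0 ∨ (idx : Int) + delta + 1 ≥ p.length then true
  else if PySem.List.pyGet? p ((idx : Int) - delta) ≠ PySem.List.pyGet? p ((idx : Int) + delta + 1) then
    false
  else
    pvExpandA p idx (delta + 1)
termination_by p.length - delta
decreasing_by omega

-- outer 'for idx in range(len(pattern) - 1)' loop of A
def pvLoopA (p : List String) (idx : Nat) : Int :=
  if h : idx + 1 ≥ p.length then -1
  else if PySem.List.pyGet? p (idx : Int) = PySem.List.pyGet? p ((idx : Int) + 1) then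
    if pvExpandA p idx 0 then (idx : Int) else pvLoopA p (idx + 1)
  else pvLoopA p (idx + 1)
termination_by p.length - idx

def get_reflected_row_number (pattern : List String) : Int := pvLoopA pattern 0

-- ===== PORT B =====
-- loop body for one value of half: two guarded conditional appends
-- (the boundary-row comparison short-circuits the slice test, as in Source B)
def pvStepB (p : List String) (half : Nat) (acc : List Int) : List Int :=
  let acc1 :=
    if PySem.List.pyGet? p 0 = PySem.List.pyGet? p (2 * (half : Int) - 1) then
      let pre := p.take (2 * half)
      if pre = pre.reverse then acc ++ [((half : Int) - 1)] else acc
    else acc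
  if PySem.List.pyGet? p ((p.length : Int) - 2 * (half : Int)) = PySem.List.pyGet? p ((p.length : Int) - 1) then
    let suf := p.drop (p.length - 2 * half)
    if suf = suf.reverse then acc1 ++ [((p.length : Int) - 1 - half)] else acc1
  else acc1

-- B's 'for half in range(1, n // 2 + 1)' loop building the candidate list
-- (pattern[:L] → List.take L, pattern[n-L:] → List.drop (n-L), s[::-1] → List.reverse)
def pvCandsB (p : List String) (i : Nat) (acc : List Int) : List Int :=
  if i < p.length / 2 then pvCandsB p (i + 1) (pvStepB p (i + 1) acc) else acc
termination_by p.length / 2 - i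
decreasing_by omega

-- 'min(cands) if cands else -1'
def get_reflected_row_number_alt (pattern : List String) : Int :=
  match PySem.List.min? (pvCandsB pattern 0 []) (fun x => x) with
  | some m => m
  | none => -1

-- ===== PRECONDITION & SPEC =====
def Spec_get_reflected_row_number (pattern : List String) (out : Int) : Prop := out = get_reflected_row_number_alt pattern
instance (pattern : List String) (out : Int) : Decidable (Spec_get_reflected_row_number pattern out) := by unfold Spec_get_reflected_row_number; infer_instance

-- ===== CLAIM (what is proved, stated in full; the proofs are below) =====
def Claim_equal_get_reflected_row_number : Prop := ∀ (pattern : List String), Dom_get_reflected_row_number pattern → Spec_get_reflected_row_number pattern (get_reflected_row_number pattern)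

-- ===== LEMMAS AND PROOFS =====

-- an axis at idx reflects to a boundary: all mirrored pairs in the shorter half match
def pvGood (p : List String) (j : Nat) : Prop :=
  ∀ d, d < min (j + 1) (p.length - j - 1) → p[j - d]? = p[j + d + 1]?

-- A's expand loop succeeds iff every mirrored pair within the shorter half matches
theorem pvExpandA_iff (p : List String) (idx d : Nat) (h : idx + 1 < p.length) :
    pvExpandA p idx d = true ↔
      ∀ j, d ≤ j → j < min (idx + 1) (p.length - idx - 1) →
        p[idx - j]? = p[idx + j + 1]? := by
  induction hfuel : p.length - d generalizing d with
  | zero =>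
      rw [pvExpandA, if_pos (by omega)]
      constructor
      · intro _ j hdj hjk; omega
      · intro _; rfl
  | succ m ih =>
      rw [pvExpandA]
      by_cases hb : (idx : Int) - d < 0 ∨ (idx : Int) + d + 1 ≥ p.length
      · rw [if_pos hb]
        constructor
        · intro _ j hdj hjk; omega
        · intro _; rfl
      · rw [if_neg hb]
        have hd1 : d ≤ idx := by omega
        have hd2 : idx + d + 1 < p.length := by omega
        have e1 : (idx : Int) - d = ((idx - d : Nat) : Int) := by omega
        have e2 : (idx : Int) + d + 1 = ((idx + d + 1 : Nat) : Int) := by push_cast; ring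
        rw [e1, e2, PySem.List.pyGet?_natCast, PySem.List.pyGet?_natCast]
        by_cases heq : p[idx - d]? = p[idx + d + 1]?
        · rw [if_neg (by simpa using heq)]
          rw [ih (d + 1) (by omega)]
          constructor
          · intro hall j hdj hjk
            rcases Nat.lt_or_ge j (d + 1) with h' | h'
            · have hjd : j = d := by omega
              subst hjd; exact heq
            · exact hall j h' hjk
          · intro hall j hdj hjk
            exact hall j (by omega) hjk
        · rw [if_pos (by simpa using heq)]
          simp only [Bool.false_eq_true, false_iff]
          intro hall
          exact heq (hall d le_rfl (by omega))

-- the even prefix of length 2h is a palindrome iff all its mirrored entries match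
theorem pvPalTake (p : List String) (h : Nat) (hh : 2 * h ≤ p.length) :
    p.take (2 * h) = (p.take (2 * h)).reverse ↔
      ∀ j, j < 2 * h → p[j]? = p[2 * h - 1 - j]? := by
  constructor
  · intro hpal j hj
    have := congrArg (fun l => l[j]?) hpal
    simp only at this
    rw [List.getElem?_reverse (by simp; omega)] at this
    simp only [List.getElem?_take, List.length_take] at this
    rw [if_pos hj, if_pos (by omega)] at this
    rw [this]
    congr 1
    omega
  · intro hall
    apply List.ext_getElem?
    intro j
    by_cases hj : j < 2 * h
    · rw [List.getElem?_reverse (by simp; omega)]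
      simp only [List.getElem?_take, List.length_take]
      rw [if_pos hj, if_pos (by omega)]
      rw [hall j hj]
      congr 1
      omega
    · rw [List.getElem?_eq_none (by simp; omega), List.getElem?_eq_none (by simp; omega)]

-- the even suffix of length 2h is a palindrome iff all its mirrored entries match
theorem pvPalDrop (p : List String) (h : Nat) (hh : 2 * h ≤ p.length) :
    p.drop (p.length - 2 * h) = (p.drop (p.length - 2 * h)).reverse ↔
      ∀ j, j < 2 * h → p[p.length - 2 * h + j]? = p[p.length - 1 - j]? := by
  have hlen : (p.drop (p.length - 2 * h)).length = 2 * h := by simp; omega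
  constructor
  · intro hpal j hj
    have := congrArg (fun l => l[j]?) hpal
    simp only at this
    rw [List.getElem?_reverse (by omega)] at this
    simp only [List.getElem?_drop, hlen] at this
    rw [this]
    congr 1
    omega
  · intro hall
    apply List.ext_getElem?
    intro j
    by_cases hj : j < 2 * h
    · rw [List.getElem?_reverse (by omega)]
      simp only [List.getElem?_drop, hlen]
      rw [show p.length - 2 * h + j = p.length - 2 * h + j from rfl]
      rw [hall j hj]
      congr 1
      omega
    · rw [List.getElem?_eq_none (by omega), List.getElem?_eq_none (by rw [List.length_reverse]; omega)]

-- a boundary-reaching axis is exactly an even palindromic prefix or suffix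
theorem pvGood_iff (p : List String) (j : Nat) (hj : j + 1 < p.length) :
    pvGood p j ↔
      ∃ h, 1 ≤ h ∧ h ≤ p.length / 2 ∧
        ((p.take (2 * h) = (p.take (2 * h)).reverse ∧ j = h - 1) ∨
         (p.drop (p.length - 2 * h) = (p.drop (p.length - 2 * h)).reverse ∧ j = p.length - 1 - h)) := by
  constructor
  · intro hg
    by_cases hside : j + 1 ≤ p.length - j - 1
    · refine ⟨j + 1, by omega, by omega, Or.inl ⟨?_, by omega⟩⟩
      rw [pvPalTake p (j + 1) (by omega)]
      intro i hi
      by_cases hij : i ≤ j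
      · have := hg (j - i) (by omega)
        rw [show j - (j - i) = i by omega] at this
        rw [this]
        congr 1
        omega
      · have := hg (i - j - 1) (by omega)
        rw [show j - (i - j - 1) = 2 * (j + 1) - 1 - i by omega,
            show j + (i - j - 1) + 1 = i by omega] at this
        exact this.symm
    · refine ⟨p.length - 1 - j, by omega, by omega, Or.inr ⟨?_, by omega⟩⟩
      set h := p.length - 1 - j with hh
      rw [pvPalDrop p h (by omega)]
      intro i hi
      by_cases hih : i < h
      · have := hg (h - 1 - i) (by omega)
        rw [show j - (h - 1 - i) = p.length - 2 * h + i by omega,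
            show j + (h - 1 - i) + 1 = p.length - 1 - i by omega] at this
        exact this
      · have := hg (i - h) (by omega)
        rw [show j - (i - h) = p.length - 1 - i by omega,
            show j + (i - h) + 1 = p.length - 2 * h + i by omega] at this
        exact this.symm
  · rintro ⟨h, h1, h2, hc | hc⟩
    · obtain ⟨hpal, hjh⟩ := hc
      have h2h : 2 * h ≤ p.length := by omega
      rw [pvPalTake p h h2h] at hpal
      intro d hd
      have hk : min (j + 1) (p.length - j - 1) = h := by omega
      rw [hk] at hd
      have := hpal (j - d) (by omega)
      rw [show 2 * h - 1 - (j - d) = j + d + 1 by omega] at this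
      exact this
    · obtain ⟨hpal, hjh⟩ := hc
      have h2h : 2 * h ≤ p.length := by omega
      rw [pvPalDrop p h h2h] at hpal
      intro d hd
      have hk : min (j + 1) (p.length - j - 1) = h := by omega
      rw [hk] at hd
      have := hpal (h - 1 - d) (by omega)
      rw [show p.length - 2 * h + (h - 1 - d) = j - d by omega,
          show p.length - 1 - (h - 1 - d) = j + d + 1 by omega] at this
      exact this

-- equation lemmas for pvCandsB
theorem pvCandsB_stop (p : List String) (i : Nat) (acc : List Int)
    (h : ¬ i < p.length / 2) : pvCandsB p i acc = acc := by
  conv_lhs => rw [pvCandsB]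
  rw [if_neg h]

theorem pvCandsB_step (p : List String) (i : Nat) (acc : List Int)
    (h : i < p.length / 2) : pvCandsB p i acc = pvCandsB p (i + 1) (pvStepB p (i + 1) acc) := by
  conv_lhs => rw [pvCandsB]
  rw [if_pos h]

-- the loop body appends onto acc
theorem pvStepB_acc (p : List String) (half : Nat) (acc : List Int) :
    pvStepB p half acc = acc ++ pvStepB p half [] := by
  unfold pvStepB
  dsimp only
  split_ifs <;> simp

-- membership in one loop body's contribution (the guards are implied by the palindrome tests)
theorem pvStepB_mem (p : List String) (half : Nat) (c : Int)
    (h1 : 1 ≤ half) (h2 : half ≤ p.length / 2) :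
    c ∈ pvStepB p half [] ↔
      ((p.take (2 * half) = (p.take (2 * half)).reverse ∧ c = ((half : Int) - 1)) ∨
       (p.drop (p.length - 2 * half) = (p.drop (p.length - 2 * half)).reverse ∧ c = ((p.length : Int) - 1 - half))) := by
  have h2h : 2 * half ≤ p.length := by omega
  unfold pvStepB
  dsimp only
  have e0 : (0 : Int) = ((0 : Nat) : Int) := by norm_num
  have e1 : 2 * (half : Int) - 1 = ((2 * half - 1 : Nat) : Int) := by omega
  have e2 : (p.length : Int) - 2 * (half : Int) = ((p.length - 2 * half : Nat) : Int) := by omega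
  have e3 : (p.length : Int) - 1 = ((p.length - 1 : Nat) : Int) := by omega
  have hacc1 :
      (if PySem.List.pyGet? p 0 = PySem.List.pyGet? p (2 * (half : Int) - 1) then
        if p.take (2 * half) = (p.take (2 * half)).reverse then ([] : List Int) ++ [((half : Int) - 1)] else []
      else ([] : List Int)) =
      (if p.take (2 * half) = (p.take (2 * half)).reverse then [((half : Int) - 1)] else []) := by
    by_cases hpal : p.take (2 * half) = (p.take (2 * half)).reverse
    · have hg : PySem.List.pyGet? p 0 = PySem.List.pyGet? p (2 * (half : Int) - 1) := by
        rw [e0, e1, PySem.List.pyGet?_natCast, PySem.List.pyGet?_natCast]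
        have := (pvPalTake p half h2h).mp hpal 0 (by omega)
        simpa using this
      simp only [if_pos hg, if_pos hpal, List.nil_append]
    · by_cases hg : PySem.List.pyGet? p 0 = PySem.List.pyGet? p (2 * (half : Int) - 1)
      · simp only [if_pos hg, if_neg hpal]
      · simp only [if_neg hg, if_neg hpal]
  rw [hacc1]
  have hfin :
      (if PySem.List.pyGet? p ((p.length : Int) - 2 * (half : Int)) = PySem.List.pyGet? p ((p.length : Int) - 1) then
        if p.drop (p.length - 2 * half) = (p.drop (p.length - 2 * half)).reverse then
          (if p.take (2 * half) = (p.take (2 * half)).reverse then [((half : Int) - 1)] else []) ++ [((p.length : Int) - 1 - half)]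
        else (if p.take (2 * half) = (p.take (2 * half)).reverse then [((half : Int) - 1)] else [])
      else (if p.take (2 * half) = (p.take (2 * half)).reverse then [((half : Int) - 1)] else [])) =
      ((if p.take (2 * half) = (p.take (2 * half)).reverse then [((half : Int) - 1)] else []) ++
       (if p.drop (p.length - 2 * half) = (p.drop (p.length - 2 * half)).reverse then [((p.length : Int) - 1 - half)] else [])) := by
    by_cases hpal : p.drop (p.length - 2 * half) = (p.drop (p.length - 2 * half)).reverse
    · have hg : PySem.List.pyGet? p ((p.length : Int) - 2 * (half : Int)) = PySem.List.pyGet? p ((p.length : Int) - 1) := by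
        rw [e2, e3, PySem.List.pyGet?_natCast, PySem.List.pyGet?_natCast]
        have := (pvPalDrop p half h2h).mp hpal 0 (by omega)
        simpa using this
      simp only [if_pos hg, if_pos hpal]
    · by_cases hg : PySem.List.pyGet? p ((p.length : Int) - 2 * (half : Int)) = PySem.List.pyGet? p ((p.length : Int) - 1)
      · simp only [if_pos hg, if_neg hpal, List.append_nil]
      · simp only [if_neg hg, if_neg hpal, List.append_nil]
  rw [hfin]
  simp only [List.mem_append]
  constructor
  · rintro (hc | hc) <;> [left; right] <;>
      (first
        | (rcases Decidable.em (p.take (2 * half) = (p.take (2 * half)).reverse) with hpal | hpal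
           · rw [if_pos hpal] at hc; simp at hc; exact ⟨hpal, hc⟩
           · rw [if_neg hpal] at hc; simp at hc)
        | (rcases Decidable.em (p.drop (p.length - 2 * half) = (p.drop (p.length - 2 * half)).reverse) with hpal | hpal
           · rw [if_pos hpal] at hc; simp at hc; exact ⟨hpal, hc⟩
           · rw [if_neg hpal] at hc; simp at hc))
  · rintro (⟨hpal, hc⟩ | ⟨hpal, hc⟩) <;> [left; right] <;> rw [if_pos hpal] <;> simp [hc]


-- pvCandsB accumulates onto acc
theorem pvCandsB_acc (p : List String) (i : Nat) (acc : List Int) :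
    pvCandsB p i acc = acc ++ pvCandsB p i [] := by
  induction hfuel : p.length / 2 - i generalizing i acc with
  | zero =>
      rw [pvCandsB_stop p i acc (by omega), pvCandsB_stop p i [] (by omega)]
      simp
  | succ m ih =>
      by_cases hi : i < p.length / 2
      · rw [pvCandsB_step p i acc hi, pvCandsB_step p i [] hi]
        rw [ih (i + 1) _ (by omega), ih (i + 1) (pvStepB p (i + 1) []) (by omega)]
        rw [pvStepB_acc]
        simp
      · rw [pvCandsB_stop p i acc hi, pvCandsB_stop p i [] hi]
        simp

-- membership in the candidate list
theorem pvCandsB_mem (p : List String) (i : Nat) (c : Int) :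
    c ∈ pvCandsB p i [] ↔
      ∃ h, i + 1 ≤ h ∧ h ≤ p.length / 2 ∧
        ((p.take (2 * h) = (p.take (2 * h)).reverse ∧ c = ((h : Int) - 1)) ∨
         (p.drop (p.length - 2 * h) = (p.drop (p.length - 2 * h)).reverse ∧ c = ((p.length : Int) - 1 - h))) := by
  induction hfuel : p.length / 2 - i generalizing i with
  | zero =>
      rw [pvCandsB_stop p i [] (by omega)]
      simp only [List.not_mem_nil, false_iff]
      rintro ⟨h, h1, h2, _⟩
      omega
  | succ m ih =>
      rw [pvCandsB_step p i [] (by omega), pvCandsB_acc, List.mem_append,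
          pvStepB_mem p (i + 1) c (by omega) (by omega), ih (i + 1) (by omega)]
      constructor
      · rintro (hc | ⟨h, h1, h2, hc⟩)
        · exact ⟨i + 1, le_rfl, by omega, hc⟩
        · exact ⟨h, by omega, h2, hc⟩
      · rintro ⟨h, h1, h2, hc⟩
        by_cases hih : h = i + 1
        · subst hih
          exact Or.inl hc
        · exact Or.inr ⟨h, by omega, h2, hc⟩

-- when no axis reflects to a boundary, A's scan returns -1
theorem pvLoopA_none (p : List String) (i : Nat)
    (hall : ∀ j, i ≤ j → j + 1 < p.length → ¬ pvGood p j) :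
    pvLoopA p i = -1 := by
  induction hfuel : p.length - i generalizing i with
  | zero => rw [pvLoopA, dif_pos (by omega)]
  | succ m ih =>
      rw [pvLoopA]
      by_cases hi : i + 1 ≥ p.length
      · rw [dif_pos hi]
      · rw [dif_neg hi]
        have hrec : pvLoopA p (i + 1) = -1 :=
          ih (i + 1) (fun j hj => hall j (by omega)) (by omega)
        by_cases hg : PySem.List.pyGet? p (i : Int) = PySem.List.pyGet? p ((i : Int) + 1)
        · rw [if_pos hg]
          have hexp : pvExpandA p i 0 ≠ true := by
            intro ht
            exact hall i le_rfl (by omega)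
              (fun d hd => (pvExpandA_iff p i 0 (by omega)).mp ht d (by omega) hd)
          rw [if_neg hexp]
          exact hrec
        · rw [if_neg hg]
          exact hrec

-- A's scan returns the least reflecting axis
theorem pvLoopA_found (p : List String) (i j : Nat)
    (hij : i ≤ j) (hjn : j + 1 < p.length) (hg : pvGood p j)
    (hmin : ∀ j', j' < j → ¬ pvGood p j') :
    pvLoopA p i = (j : Int) := by
  induction hfuel : p.length - i generalizing i with
  | zero => omega
  | succ m ih =>
      rw [pvLoopA, dif_neg (by omega)]
      by_cases hij' : i = j
      · subst hij'
        have hguard : PySem.List.pyGet? p (i : Int) = PySem.List.pyGet? p ((i : Int) + 1) := by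
          have := hg 0 (by omega)
          simp only [Nat.sub_zero, Nat.add_zero] at this
          rw [show (i : Int) + 1 = ((i + 1 : Nat) : Int) by push_cast; ring,
              PySem.List.pyGet?_natCast, PySem.List.pyGet?_natCast]
          simpa using this
        rw [if_pos hguard,
            if_pos ((pvExpandA_iff p i 0 hjn).mpr (fun d _ hd => hg d hd))]
      · have hlt : i < j := by omega
        have hnot : ¬ pvGood p i := hmin i hlt
        have hrec : pvLoopA p (i + 1) = (j : Int) := ih (i + 1) (by omega) (by omega)
        by_cases hguard : PySem.List.pyGet? p (i : Int) = PySem.List.pyGet? p ((i : Int) + 1)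
        · rw [if_pos hguard]
          have hexp : pvExpandA p i 0 ≠ true := by
            intro ht
            exact hnot (fun d hd => (pvExpandA_iff p i 0 (by omega)).mp ht d (by omega) hd)
          rw [if_neg hexp]
          exact hrec
        · rw [if_neg hguard]
          exact hrec

-- a candidate's value is the index of a reflecting axis
theorem pvCand_good (p : List String) (c : Int) (hc : c ∈ pvCandsB p 0 []) :
    ∃ j : Nat, j + 1 < p.length ∧ pvGood p j ∧ c = (j : Int) := by
  rw [pvCandsB_mem] at hc
  obtain ⟨h, h1, h2, hcase⟩ := hc
  have h2h : 2 * h ≤ p.length := by omega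
  rcases hcase with ⟨hpal, hcv⟩ | ⟨hpal, hcv⟩
  · refine ⟨h - 1, by omega, ?_, by omega⟩
    rw [pvGood_iff p (h - 1) (by omega)]
    exact ⟨h, h1, h2, Or.inl ⟨hpal, rfl⟩⟩
  · refine ⟨p.length - 1 - h, by omega, ?_, by omega⟩
    rw [pvGood_iff p (p.length - 1 - h) (by omega)]
    exact ⟨h, h1, h2, Or.inr ⟨hpal, rfl⟩⟩

-- ===== VERDICT (by name: the statement is the Claim_ definition above) =====
theorem get_reflected_row_number_spec : Claim_equal_get_reflected_row_number := by
  intro pattern _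
  unfold Spec_get_reflected_row_number get_reflected_row_number get_reflected_row_number_alt
  classical
  by_cases hex : ∃ j : Nat, j + 1 < pattern.length ∧ pvGood pattern j
  · have hfind := Nat.find_spec hex
    set j := Nat.find hex with hj
    have hmin : ∀ j', j' < j → ¬ pvGood pattern j' := by
      intro j' hj' hg'
      by_cases hjn' : j' + 1 < pattern.length
      · exact Nat.find_min hex hj' ⟨hjn', hg'⟩
      · omega
    rw [pvLoopA_found pattern 0 j (by omega) hfind.1 hfind.2 hmin]
    -- B side: j is in the candidate list and is its minimum
    have hjmem : (j : Int) ∈ pvCandsB pattern 0 [] := by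
      rw [pvCandsB_mem]
      obtain ⟨h, h1, h2, hc⟩ := (pvGood_iff pattern j hfind.1).mp hfind.2
      refine ⟨h, h1, h2, ?_⟩
      rcases hc with ⟨hpal, hjv⟩ | ⟨hpal, hjv⟩
      · exact Or.inl ⟨hpal, by omega⟩
      · exact Or.inr ⟨hpal, by omega⟩
    obtain ⟨mv, hmv⟩ : ∃ mv, PySem.List.min? (pvCandsB pattern 0 []) (fun x => x) = some mv := by
      cases hmv : PySem.List.min? (pvCandsB pattern 0 []) (fun x => x) with
      | none =>
          rw [PySem.List.min?_eq_none_iff] at hmv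
          rw [hmv] at hjmem
          simp at hjmem
      | some mv => exact ⟨mv, rfl⟩
    rw [hmv]
    show (j : Int) = mv
    have hmle : mv ≤ (j : Int) := PySem.List.min?_isMin hmv (j : Int) hjmem
    obtain ⟨j', hjn', hg', hmv'⟩ := pvCand_good pattern mv (PySem.List.min?_mem hmv)
    have hjle : j ≤ j' := Nat.find_min' hex ⟨hjn', hg'⟩
    omega
  · simp only [not_exists, not_and] at hex
    rw [pvLoopA_none pattern 0 (fun j _ hjn => hex j hjn)]
    have hnil : pvCandsB pattern 0 [] = [] := by
      rcases hc : pvCandsB pattern 0 [] with _ | ⟨c, rest⟩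
      · rfl
      · exfalso
        obtain ⟨j, hjn, hg, _⟩ := pvCand_good pattern c (by rw [hc]; simp)
        exact hex j hjn hg
    rw [hnil]
    simp [PySem.List.min?]
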